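-- pv_equiv track=rewrite | github.com/Dyleis26/Kalshi-Bot | data/odds.py | find_matching_odds
-- ===== SOURCE A (Python) =====
-- def find_matching_odds(odds_games: list[dict], home_abbr: str, away_abbr: str,
--                        home_team: str, away_team: str) -> dict | None:
--     """
--     Find the odds entry matching the given team abbreviations/names.
--
--     Scoring: 2 pts per team name match (substring). Returns best match
--     with score ≥ 2 (at least one team matched on each side).
--     Returns None if no match found.
--     """
--     home_words = {w.lower() for w in home_team.split() if len(w) > 2}
--     away_words = {w.lower() for w in away_team.split() if len(w) > 2}
--     home_lower = home_abbr.lower()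
--     away_lower = away_abbr.lower()
--
--     best, best_score = None, 0
--     for g in odds_games:
--         g_home = g["home_team"].lower()
--         g_away = g["away_team"].lower()
--         score = 0
--         if home_lower in g_home or any(w in g_home for w in home_words):
--             score += 2
--         if away_lower in g_away or any(w in g_away for w in away_words):
--             score += 2
--         if score > best_score:
--             best_score, best = score, g
--
--     return best if best_score >= 2 else None
-- ===== SOURCE B (Python) =====
-- def find_matching_odds(odds_games: list[dict], home_abbr: str, away_abbr: str,
--                        home_team: str, away_team: str) -> dict | None:
--     """Two prioritized passes instead of score bookkeeping: the per-game score is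
--     0/2/4 and `>` keeps the first maximum, so the answer is the first game
--     matching on both sides, else the first game matching on either side."""
--     home_words = {w.lower() for w in home_team.split() if len(w) > 2}
--     away_words = {w.lower() for w in away_team.split() if len(w) > 2}
--     home_lower = home_abbr.lower()
--     away_lower = away_abbr.lower()
--
--     def home_ok(g):
--         gh = g["home_team"].lower()
--         return home_lower in gh or any(w in gh for w in home_words)
--
--     def away_ok(g):
--         ga = g["away_team"].lower()
--         return away_lower in ga or any(w in ga for w in away_words)
--
--     for g in odds_games:
--         if home_ok(g) and away_ok(g):
--             return g
--     for g in odds_games: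
--         if home_ok(g) or away_ok(g):
--             return g
--     return None
-- ===== Notes on version B (the rewrite author's own statement) =====
-- stated objective: simpler
-- what changed: Replaces the best-score accumulator loop with two prioritized passes (first game matching both sides, else first game matching one side), exploiting that scores are only 0/2/4 and '>' keeps the first maximum.
import Mathlib
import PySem

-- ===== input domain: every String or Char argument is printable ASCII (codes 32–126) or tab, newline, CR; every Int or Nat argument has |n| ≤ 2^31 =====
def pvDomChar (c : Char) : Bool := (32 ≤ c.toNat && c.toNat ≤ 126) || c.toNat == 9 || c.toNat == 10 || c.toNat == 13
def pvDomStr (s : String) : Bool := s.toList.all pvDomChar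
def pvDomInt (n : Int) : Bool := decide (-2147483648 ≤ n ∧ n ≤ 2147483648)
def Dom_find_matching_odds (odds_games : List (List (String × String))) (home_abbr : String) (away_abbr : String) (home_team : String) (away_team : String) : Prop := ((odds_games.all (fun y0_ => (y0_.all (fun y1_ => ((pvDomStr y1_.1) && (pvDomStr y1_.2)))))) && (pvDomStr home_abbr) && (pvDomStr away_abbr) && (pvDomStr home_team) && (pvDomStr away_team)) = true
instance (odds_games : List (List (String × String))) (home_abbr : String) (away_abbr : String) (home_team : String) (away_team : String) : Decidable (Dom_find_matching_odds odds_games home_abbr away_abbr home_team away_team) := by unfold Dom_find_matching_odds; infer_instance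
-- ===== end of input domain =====

-- B replaces A's best-score accumulator loop with two prioritized first-match passes
-- (scores are only 0/2/4 and '>' keeps the first maximum); same cost, plainer control flow.

-- ===== PORT A =====
-- {w.lower() for w in team.split() if len(w) > 2}
def pvWords (team : String) : PySem.Set String :=
  PySem.Set.ofList (((PySem.Str.split₀ team).filter (fun w => 2 < PySem.Str.len w)).map PySem.Str.lower)

-- home_lower in g["home_team"].lower() or any(w in … for w in home_words)
def pvHomeMatch (home_lower : String) (home_words : PySem.Set String) (g : List (String × String)) : Bool :=
  let g_home := PySem.Str.lower (PySem.Dict.getD ⟨g⟩ "home_team" "")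
  PySem.Str.isIn home_lower g_home || home_words.any (fun w => PySem.Str.isIn w g_home)

def pvAwayMatch (away_lower : String) (away_words : PySem.Set String) (g : List (String × String)) : Bool :=
  let g_away := PySem.Str.lower (PySem.Dict.getD ⟨g⟩ "away_team" "")
  PySem.Str.isIn away_lower g_away || away_words.any (fun w => PySem.Str.isIn w g_away)

-- the body of A's for-loop: score the game, keep it if the score strictly improves
def pvStepA (p q : List (String × String) → Bool)
    (st : Option (List (String × String)) × Int) (g : List (String × String)) :
    Option (List (String × String)) × Int :=
  let score : Int := 0
  let score := if p g then score + 2 else score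
  let score := if q g then score + 2 else score
  if st.2 < score then (some g, score) else st

def find_matching_odds (odds_games : List (List (String × String))) (home_abbr : String) (away_abbr : String) (home_team : String) (away_team : String) : Option (List (String × String)) :=
  let home_words := pvWords home_team
  let away_words := pvWords away_team
  let home_lower := PySem.Str.lower home_abbr
  let away_lower := PySem.Str.lower away_abbr
  let r := odds_games.foldl (pvStepA (pvHomeMatch home_lower home_words) (pvAwayMatch away_lower away_words)) (none, 0)
  if 2 ≤ r.2 then r.1 else none

-- ===== PORT B =====
def find_matching_odds_alt (odds_games : List (List (String × String))) (home_abbr : String) (away_abbr : String) (home_team : String) (away_team : String) : Option (List (String × String)) :=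
  let home_words := pvWords home_team
  let away_words := pvWords away_team
  let home_lower := PySem.Str.lower home_abbr
  let away_lower := PySem.Str.lower away_abbr
  let home_ok := pvHomeMatch home_lower home_words
  let away_ok := pvAwayMatch away_lower away_words
  match odds_games.find? (fun g => home_ok g && away_ok g) with
  | some g => some g
  | none => odds_games.find? (fun g => home_ok g || away_ok g)

-- ===== PRECONDITION & SPEC =====
-- Pre_ excludes exactly the inputs where A raises KeyError: a game dict missing "home_team" or "away_team".
def Pre_find_matching_odds (odds_games : List (List (String × String))) (home_abbr : String) (away_abbr : String) (home_team : String) (away_team : String) : Prop :=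
  ∀ g ∈ odds_games, (PySem.Dict.get? (⟨g⟩ : PySem.Dict String String) "home_team").isSome ∧ (PySem.Dict.get? (⟨g⟩ : PySem.Dict String String) "away_team").isSome
instance (odds_games : List (List (String × String))) (home_abbr : String) (away_abbr : String) (home_team : String) (away_team : String) : Decidable (Pre_find_matching_odds odds_games home_abbr away_abbr home_team away_team) := by unfold Pre_find_matching_odds; infer_instance

def pvWitness_find_matching_odds : (List (List (String × String))) × String × String × String × String :=
  ([[("home_team", "Los Angeles Lakers"), ("away_team", "Boston Celtics")]], "LAL", "BOS", "Lakers", "Celtics")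

def Spec_find_matching_odds (odds_games : List (List (String × String))) (home_abbr : String) (away_abbr : String) (home_team : String) (away_team : String) (out : Option (List (String × String))) : Prop := out = find_matching_odds_alt odds_games home_abbr away_abbr home_team away_team
instance (odds_games : List (List (String × String))) (home_abbr : String) (away_abbr : String) (home_team : String) (away_team : String) (out : Option (List (String × String))) : Decidable (Spec_find_matching_odds odds_games home_abbr away_abbr home_team away_team out) := by unfold Spec_find_matching_odds; infer_instance

-- ===== CLAIM (what is proved, stated in full; the proofs are below) =====
def Claim_equal_find_matching_odds : Prop := ∀ (odds_games : List (List (String × String))) (home_abbr : String) (away_abbr : String) (home_team : String) (away_team : String), Dom_find_matching_odds odds_games home_abbr away_abbr home_team away_team → Pre_find_matching_odds odds_games home_abbr away_abbr home_team away_team → Spec_find_matching_odds odds_games home_abbr away_abbr home_team away_team (find_matching_odds odds_games home_abbr away_abbr home_team away_team)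

-- ===== LEMMAS AND PROOFS =====

-- once the accumulator holds score 4 it never changes
lemma pvfold4 (p q : List (String × String) → Bool) (l : List (List (String × String)))
    (b : Option (List (String × String))) :
    l.foldl (pvStepA p q) (b, 4) = (b, 4) := by
  induction l with
  | nil => rfl
  | cons g t ih =>
      simp only [List.foldl_cons, pvStepA]
      split_ifs <;> first | exact ih | omega

-- from score 2, only a both-sides match (score 4) replaces the kept game
lemma pvfold2 (p q : List (String × String) → Bool) (l : List (List (String × String)))
    (b : Option (List (String × String))) :
    l.foldl (pvStepA p q) (b, 2) =
      match l.find? (fun g => p g && q g) with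
      | some g => (some g, 4)
      | none => (b, 2) := by
  induction l generalizing b with
  | nil => rfl
  | cons g t ih =>
      by_cases hp : p g = true <;> by_cases hq : q g = true <;>
        simp [List.foldl_cons, pvStepA, hp, hq, ih, pvfold4]

-- full characterisation of A's fold from the initial state
lemma pvfold0 (p q : List (String × String) → Bool) (l : List (List (String × String)))
    (b : Option (List (String × String))) :
    l.foldl (pvStepA p q) (b, 0) =
      match l.find? (fun g => p g && q g), l.find? (fun g => p g || q g) with
      | some g, _ => (some g, 4)
      | none, some g => (some g, 2)
      | none, none => (b, 0) := by
  induction l generalizing b with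
  | nil => rfl
  | cons g t ih =>
      by_cases hp : p g = true <;> by_cases hq : q g = true <;>
        simp [List.foldl_cons, pvStepA, hp, hq, ih, pvfold4, pvfold2] <;>
        rcases List.find? (fun g => p g && q g) t with _ | g' <;> simp

-- ===== VERDICT (by name: the statement is the Claim_ definition above) =====
theorem find_matching_odds_spec : Claim_equal_find_matching_odds := by
  intro odds_games home_abbr away_abbr home_team away_team _ _
  simp only [Spec_find_matching_odds, find_matching_odds, find_matching_odds_alt]
  rw [pvfold0]
  rcases h4 : odds_games.find? (fun g => pvHomeMatch (PySem.Str.lower home_abbr) (pvWords home_team) g && pvAwayMatch (PySem.Str.lower away_abbr) (pvWords away_team) g) with _ | g <;>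
    rcases h2 : odds_games.find? (fun g => pvHomeMatch (PySem.Str.lower home_abbr) (pvWords home_team) g || pvAwayMatch (PySem.Str.lower away_abbr) (pvWords away_team) g) with _ | g' <;>
    simp_all
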